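-- pv_equiv track=rewrite | github.com/Rahulkumar-G/LimAuto | BookLLM/src/knowledge/domain_expert.py | _apply_enhancements
-- ===== SOURCE A (Python) =====
-- from typing import Dict, List, Any, Optional, Tuple
--
-- def _apply_enhancements(content: str, enhancements: List[str]) -> str:
--     """Apply enhancements to content intelligently"""
--
--     if not enhancements:
--         return content
--
--     # Find good insertion points (end of sections, before conclusions)
--     paragraphs = content.split('\n\n')
--     enhanced_paragraphs = []
--
--     enhancement_idx = 0
--
--     for i, paragraph in enumerate(paragraphs):
--         enhanced_paragraphs.append(paragraph)
--
--         # Insert enhancements at strategic points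
--         if (enhancement_idx < len(enhancements) and
--             (i == len(paragraphs) // 2 or  # Middle of content
--              'example' in paragraph.lower() or  # After examples
--              paragraph.endswith('.') and len(paragraph) > 100)):  # End of substantial paragraphs
--
--             enhanced_paragraphs.append(enhancements[enhancement_idx])
--             enhancement_idx += 1
--
--     # Add remaining enhancements at the end
--     while enhancement_idx < len(enhancements):
--         enhanced_paragraphs.append(enhancements[enhancement_idx])
--         enhancement_idx += 1
--
--     return '\n\n'.join(enhanced_paragraphs)
-- ===== SOURCE B (Python) =====
-- from typing import List
--
-- def _apply_enhancements(content: str, enhancements: List[str]) -> str: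
--     """Apply enhancements to content: precompute qualifying insertion points, then render."""
--     if not enhancements:
--         return content
--
--     paragraphs = content.split('\n\n')
--     half = len(paragraphs) // 2
--
--     qualifying = [i for i, p in enumerate(paragraphs)
--                   if i == half
--                   or 'example' in p.lower()
--                   or (p.endswith('.') and len(p) > 100)]
--
--     # Map the first qualifying points, in order, to the enhancements in order.
--     assigned = dict(zip(qualifying, enhancements))
--
--     out = []
--     for i, p in enumerate(paragraphs):
--         out.append(p)
--         if i in assigned:
--             out.append(assigned[i])
--
--     # Leftover enhancements go at the end.
--     out.extend(enhancements[len(qualifying):])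
--     return '\n\n'.join(out)
-- ===== Notes on version B (the rewrite author's own statement) =====
-- stated objective: alternative
-- what changed: A's single pass couples scanning and insertion through a mutable enhancement_idx; B splits the work into a precompute pass that lists the qualifying paragraph indices and zips them with the enhancements, and a render pass that walks the paragraphs looking each index up in that assignment, appending leftovers at the end.
import Mathlib
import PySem

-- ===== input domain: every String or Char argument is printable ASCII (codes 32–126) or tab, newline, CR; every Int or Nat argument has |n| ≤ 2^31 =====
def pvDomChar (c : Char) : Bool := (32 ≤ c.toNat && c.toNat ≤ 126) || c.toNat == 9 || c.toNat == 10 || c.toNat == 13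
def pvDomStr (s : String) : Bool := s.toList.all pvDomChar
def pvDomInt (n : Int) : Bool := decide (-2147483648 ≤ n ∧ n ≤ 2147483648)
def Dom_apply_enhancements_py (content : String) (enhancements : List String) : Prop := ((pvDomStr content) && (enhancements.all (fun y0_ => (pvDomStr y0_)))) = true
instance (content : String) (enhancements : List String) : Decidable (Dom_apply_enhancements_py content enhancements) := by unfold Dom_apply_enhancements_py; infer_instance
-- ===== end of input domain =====

-- B re-derives A's single coupled pass as a precompute-then-render split (same cost, clearer structure); return value only, no mutation.

-- ===== PORT A =====
-- the strategic-point condition, identical in both Pythons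
-- (half = len(paragraphs) // 2, a loop-constant expression, computed once)
def pvStrategic (half : Int) (i : Int) (p : String) : Bool :=
  (i == half) || PySem.Str.isIn "example" (PySem.Str.lower p) ||
    (PySem.Str.endswith p "." && decide (100 < PySem.Str.len p))

-- the trailing `while enhancement_idx < len(enhancements)` loop of A
def pvTailA (es : List String) (idx : Nat) : List String :=
  if h : idx < es.length then es[idx] :: pvTailA es (idx + 1) else []
termination_by es.length - idx

-- the `for i, paragraph in enumerate(paragraphs)` loop of A, state = (output so far, enhancement_idx)
def pvLoopA (half : Int) (es : List String) : List (Int × String) → Nat → List String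
  | [], idx => pvTailA es idx
  | (i, p) :: rest, idx =>
    if decide (idx < es.length) && pvStrategic half i p then
      p :: es.getD idx "" :: pvLoopA half es rest (idx + 1)   -- enhancements[idx], idx < len holds
    else
      p :: pvLoopA half es rest idx

def apply_enhancements_py (content : String) (enhancements : List String) : String :=
  if enhancements = [] then content
  else
    -- split? is some because the separator "\n\n" is nonempty
    let paragraphs := (PySem.Str.split? content "\n\n").getD []
    PySem.Str.join "\n\n"
      (pvLoopA (PySem.Int.floordiv (PySem.List.len paragraphs) 2) enhancements
        (PySem.List.enumerate paragraphs) 0)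

-- ===== PORT B =====
-- second pass of B: append each paragraph, and its assigned enhancement if any
def pvWalkB (assigned : List (Int × String)) : List (Int × String) → List String
  | [] => []
  | (i, p) :: rest =>
    match assigned.lookup i with   -- `if i in assigned: … assigned[i]` (keys are distinct indices)
    | some e => p :: e :: pvWalkB assigned rest
    | none => p :: pvWalkB assigned rest

def apply_enhancements_py_alt (content : String) (enhancements : List String) : String :=
  if enhancements = [] then content
  else
    -- split? is some because the separator "\n\n" is nonempty
    let paragraphs := (PySem.Str.split? content "\n\n").getD []
    let half := PySem.Int.floordiv (PySem.List.len paragraphs) 2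
    let qualifying :=
      ((PySem.List.enumerate paragraphs).filter (fun ip => pvStrategic half ip.1 ip.2)).map (·.1)
    let assigned := qualifying.zip enhancements   -- dict(zip(qualifying, enhancements))
    PySem.Str.join "\n\n"
      (pvWalkB assigned (PySem.List.enumerate paragraphs) ++ enhancements.drop qualifying.length)

-- ===== PRECONDITION & SPEC =====
def Spec_apply_enhancements_py (content : String) (enhancements : List String) (out : String) : Prop := out = apply_enhancements_py_alt content enhancements
instance (content : String) (enhancements : List String) (out : String) : Decidable (Spec_apply_enhancements_py content enhancements out) := by unfold Spec_apply_enhancements_py; infer_instance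

-- ===== CLAIM (what is proved, stated in full; the proofs are below) =====
def Claim_equal_apply_enhancements_py : Prop := ∀ (content : String) (enhancements : List String), Dom_apply_enhancements_py content enhancements → Spec_apply_enhancements_py content enhancements (apply_enhancements_py content enhancements)

-- ===== LEMMAS AND PROOFS =====

theorem pvTailA_eq_drop (es : List String) (idx : Nat) : pvTailA es idx = es.drop idx := by
  have H : ∀ k idx, es.length - idx ≤ k → pvTailA es idx = es.drop idx := by
    intro k
    induction k with
    | zero =>
      intro idx hk
      unfold pvTailA
      rw [dif_neg (by omega)]
      exact (List.drop_eq_nil_of_le (by omega)).symm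
    | succ k ih =>
      intro idx hk
      unfold pvTailA
      by_cases h : idx < es.length
      · rw [dif_pos h, ih (idx + 1) (by omega)]
        exact (List.drop_eq_getElem_cons h).symm
      · rw [dif_neg h]
        exact (List.drop_eq_nil_of_le (by omega)).symm
  exact H _ idx le_rfl

theorem pvLookup_eq_none {i : Int} (l : List (Int × String)) (h : ∀ q ∈ l, q.1 ≠ i) :
    l.lookup i = none := by
  induction l with
  | nil => rfl
  | cons a t ih =>
    obtain ⟨k, v⟩ := a
    have hk : k ≠ i := h (k, v) List.mem_cons_self
    have hb : (i == k) = false := by simp; exact fun e => hk e.symm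
    simp only [List.lookup_cons, hb]
    exact ih fun q hq => h q (List.mem_cons_of_mem _ hq)

theorem pvWalkB_cons_irrel (a : Int × String) (assigned L : List (Int × String))
    (h : ∀ q ∈ L, q.1 ≠ a.1) :
    pvWalkB (a :: assigned) L = pvWalkB assigned L := by
  induction L with
  | nil => rfl
  | cons b t ih =>
    obtain ⟨i, p⟩ := b
    have hi : i ≠ a.1 := h (i, p) List.mem_cons_self
    obtain ⟨k, v⟩ := a
    have hb : (i == k) = false := by simp; exact hi
    simp only [pvWalkB, List.lookup_cons, hb]
    rw [ih fun q hq => h q (List.mem_cons_of_mem _ hq)]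

-- qualifying indices of a (suffix of the) enumerated paragraph list
def pvQual (half : Int) (L : List (Int × String)) : List Int :=
  (L.filter (fun ip => pvStrategic half ip.1 ip.2)).map (·.1)

theorem pvKey (half : Int) (es : List String) (L : List (Int × String)) :
    ∀ idx : Nat, L.Pairwise (fun a b => a.1 < b.1) →
      pvLoopA half es L idx =
        pvWalkB ((pvQual half L).zip (es.drop idx)) L ++
          (es.drop idx).drop (pvQual half L).length := by
  induction L with
  | nil =>
    intro idx _
    simp [pvLoopA, pvQual, pvWalkB, pvTailA_eq_drop]
  | cons hd rest ih =>
    intro idx hpw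
    obtain ⟨i, p⟩ := hd
    rw [List.pairwise_cons] at hpw
    obtain ⟨hlt, hpw'⟩ := hpw
    have hne : ∀ q ∈ rest, q.1 ≠ i := fun q hq => by have := hlt q hq; omega
    by_cases hs : pvStrategic half i p = true
    · have hqual : pvQual half ((i, p) :: rest) = i :: pvQual half rest := by
        simp [pvQual, hs]
      by_cases hidx : idx < es.length
      · -- an enhancement is consumed at this paragraph
        have hdrop : es.drop idx = es[idx] :: es.drop (idx + 1) := List.drop_eq_getElem_cons hidx
        simp only [pvLoopA, hs, hidx, decide_true, Bool.and_true, if_true, hqual, hdrop,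
          List.zip_cons_cons, pvWalkB, List.lookup_cons, BEq.rfl]
        rw [ih (idx + 1) hpw']
        rw [pvWalkB_cons_irrel (i, es[idx]) _ rest hne]
        simp [List.getElem?_eq_getElem hidx]
        omega
      · -- enhancements exhausted: neither side inserts anything any more
        have hdrop : es.drop idx = [] := List.drop_eq_nil_of_le (by omega)
        simp only [pvLoopA, hs, hidx, decide_false, Bool.false_and, hqual, hdrop,
          List.zip_nil_right, pvWalkB, List.lookup_nil]
        rw [ih idx hpw']
        simp [hdrop]
    · -- not a strategic point: i is not a key of the assignment
      rw [Bool.not_eq_true] at hs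
      have hqual : pvQual half ((i, p) :: rest) = pvQual half rest := by
        simp [pvQual, hs]
      have hkeys : ∀ q ∈ (pvQual half rest).zip (es.drop idx), q.1 ≠ i := by
        intro q hq hcontra
        have h1 : q.1 ∈ pvQual half rest := (List.of_mem_zip hq).1
        simp only [pvQual, List.mem_map] at h1
        obtain ⟨ip, hipf, hip1⟩ := h1
        have hmem : ip ∈ rest := List.mem_of_mem_filter hipf
        have := hlt ip hmem
        omega
      simp only [pvLoopA, hs, Bool.and_false, hqual, pvWalkB,
        pvLookup_eq_none _ hkeys]
      rw [ih idx hpw']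
      simp

theorem apply_enhancements_py_spec : Claim_equal_apply_enhancements_py := by
  intro content enhancements _
  unfold Spec_apply_enhancements_py apply_enhancements_py apply_enhancements_py_alt
  by_cases h : enhancements = []
  · simp [h]
  · simp only [h, if_false]
    rw [pvKey _ _ _ 0 (PySem.List.pairwise_lt_enumerate _ _)]
    simp [pvQual]
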